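-- pv_equiv track=rewrite | github.com/huangruizhe/torchaudio_aligner | src/alignment/wfst/lis_utils.py | find_unaligned_regions
-- ===== SOURCE A (Python) =====
-- from typing import List, Tuple, Set, Dict, Optional
--
-- def find_unaligned_regions(
--     rg_min: int,
--     rg_max: int,
--     aligned_indices: Set[int],
--     merge_threshold: int = 3,
-- ) -> List[Tuple[int, int]]:
--     """
--     Find unaligned "holes" in the transcript.
--
--     Args:
--         rg_min: Minimum word index in alignment
--         rg_max: Maximum word index in alignment
--         aligned_indices: Set of aligned word indices
--         merge_threshold: Merge holes closer than this
--
--     Returns: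
--         List of (start, end) tuples for unaligned regions
--     """
--     import itertools
--
--     # Find consecutive unaligned regions
--     holes = [
--         [rg_min + i for i, _ in group]
--         for key, group in itertools.groupby(
--             enumerate(range(rg_min, rg_max + 1)),
--             key=lambda x: x[1] in aligned_indices
--         )
--         if not key
--     ]
--
--     # Convert to (start, end) tuples
--     holes = [(group[0], group[-1]) for group in holes]
--
--     # Merge close holes
--     if merge_threshold > 0:
--         holes = merge_segments(holes, merge_threshold)
--
--     return holes
--
-- def merge_segments(
--     segments: List[Tuple[int, int]],
--     threshold: int,
-- ) -> List[Tuple[int, int]]: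
--     """
--     Merge segments that are closer than threshold.
--
--     Args:
--         segments: List of (start, end) tuples
--         threshold: Maximum gap to merge
--
--     Returns:
--         Merged segments
--     """
--     if not segments:
--         return []
--
--     merged = []
--     for start, end in sorted(segments, key=lambda x: x[0]):
--         if merged and start - merged[-1][1] <= threshold:
--             merged[-1] = (merged[-1][0], max(merged[-1][1], end))
--         else:
--             merged.append((start, end))
--
--     return merged
-- ===== SOURCE B (Python) =====
-- def find_unaligned_regions(rg_min, rg_max, aligned_indices, merge_threshold=3):
--     # Derive holes from gaps between sorted in-range aligned indices
--     # instead of scanning every index in [rg_min, rg_max].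
--     anchors = sorted({i for i in aligned_indices if rg_min <= i <= rg_max})
--     holes = []
--     cursor = rg_min
--     for a in anchors:
--         if cursor <= a - 1:
--             holes.append((cursor, a - 1))
--         cursor = a + 1
--     if cursor <= rg_max:
--         holes.append((cursor, rg_max))
--     if merge_threshold <= 0:
--         return holes
--     merged = []
--     for s, e in holes:
--         if merged and s - merged[-1][1] <= merge_threshold:
--             merged[-1] = (merged[-1][0], e)
--         else:
--             merged.append((s, e))
--     return merged
-- ===== Notes on version B (the rewrite author's own statement) =====
-- stated objective: alternative
-- what changed: B sorts the deduplicated in-range aligned indices and derives the unaligned holes from the gaps between consecutive anchors (merging close holes in one pass over the already-ordered holes, no re-sort), instead of A's itertools.groupby scan over every index of [rg_min, rg_max].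
import Mathlib
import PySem

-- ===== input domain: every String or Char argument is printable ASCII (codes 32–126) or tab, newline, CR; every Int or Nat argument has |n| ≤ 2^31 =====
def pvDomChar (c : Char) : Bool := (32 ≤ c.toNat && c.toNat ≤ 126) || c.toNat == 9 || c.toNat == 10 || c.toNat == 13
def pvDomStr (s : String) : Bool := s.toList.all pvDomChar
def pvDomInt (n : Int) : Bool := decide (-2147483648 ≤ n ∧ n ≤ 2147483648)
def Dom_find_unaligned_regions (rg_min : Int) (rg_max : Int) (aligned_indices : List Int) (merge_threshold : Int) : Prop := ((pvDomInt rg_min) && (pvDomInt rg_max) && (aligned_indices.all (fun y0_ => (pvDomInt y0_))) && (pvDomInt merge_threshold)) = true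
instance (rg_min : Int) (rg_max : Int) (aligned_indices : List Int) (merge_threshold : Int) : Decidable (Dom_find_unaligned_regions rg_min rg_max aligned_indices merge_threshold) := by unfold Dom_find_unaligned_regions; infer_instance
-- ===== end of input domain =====

-- B derives the holes from the gaps between the sorted in-range aligned indices instead of
-- A's groupby scan of every index in [rg_min, rg_max] (alternative algorithm, same result).

-- ===== PORT A =====

-- list(enumerate(xs)): hand-ported tail-recursively (exact — proved equal to
-- PySem.List.enumerate below, whose non-tail recursion overflows the interpreter
-- stack on long ranges).
def pvEnumAux {α : Type} (s : Int) : List α → List (Int × α) → List (Int × α)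
  | [], acc => acc.reverse
  | x :: xs, acc => pvEnumAux (s + 1) xs ((s, x) :: acc)

-- itertools.groupby with a Bool key, transliterated: each group is the maximal run of
-- equal key values, in order.
def pvGroupBy {α : Type} (key : α → Bool) : List α → List (Bool × List α)
  | [] => []
  | x :: xs =>
    (key x, x :: xs.takeWhile (fun y => key y == key x)) ::
      pvGroupBy key (xs.dropWhile (fun y => key y == key x))
termination_by l => l.length
decreasing_by
  simp only [List.length_cons]
  exact Nat.lt_succ_of_le (List.length_dropWhile_le _ _)

def merge_segments (segments : List (Int × Int)) (threshold : Int) : List (Int × Int) :=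
  if segments = [] then []
  else
    (PySem.List.sorted segments (fun p => p.1) false).foldl
      (fun merged p =>
        match merged.getLast? with
        | some q => if p.1 - q.2 ≤ threshold then merged.dropLast ++ [(q.1, max q.2 p.2)]
                    else merged ++ [p]
        | none => merged ++ [p]) []

def find_unaligned_regions (rg_min : Int) (rg_max : Int) (aligned_indices : List Int) (merge_threshold : Int) : List (Int × Int) :=
  let holes0 : List (List Int) :=
    ((pvGroupBy (fun x => aligned_indices.contains x.2)
        (pvEnumAux 0 (PySem.List.pyRange rg_min (rg_max + 1) 1) [])).filter
      (fun g => !g.1)).map (fun g => g.2.map (fun x => rg_min + x.1))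
  -- group[0] / group[-1]: every group produced by groupby is nonempty, so headD/getLastD
  -- with a dummy default are exact here
  let holes : List (Int × Int) := holes0.map (fun g => (g.headD 0, g.getLastD 0))
  if merge_threshold > 0 then merge_segments holes merge_threshold else holes

-- ===== PORT B =====

def find_unaligned_regions_alt (rg_min : Int) (rg_max : Int) (aligned_indices : List Int) (merge_threshold : Int) : List (Int × Int) :=
  let anchors : List Int :=
    PySem.List.sorted
      (PySem.Set.ofList (aligned_indices.filter (fun i => decide (rg_min ≤ i) && decide (i ≤ rg_max))))
      (fun x => x) false
  let st : List (Int × Int) × Int :=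
    anchors.foldl (fun st a =>
      ((if st.2 ≤ a - 1 then st.1 ++ [(st.2, a - 1)] else st.1), a + 1)) ([], rg_min)
  let holes : List (Int × Int) := if st.2 ≤ rg_max then st.1 ++ [(st.2, rg_max)] else st.1
  if merge_threshold ≤ 0 then holes
  else
    holes.foldl (fun merged p =>
      match merged.getLast? with
      | some q => if p.1 - q.2 ≤ merge_threshold then merged.dropLast ++ [(q.1, p.2)]
                  else merged ++ [p]
      | none => [p]) []

-- ===== PRECONDITION & SPEC =====
def Spec_find_unaligned_regions (rg_min : Int) (rg_max : Int) (aligned_indices : List Int) (merge_threshold : Int) (out : List (Int × Int)) : Prop := out = find_unaligned_regions_alt rg_min rg_max aligned_indices merge_threshold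
instance (rg_min : Int) (rg_max : Int) (aligned_indices : List Int) (merge_threshold : Int) (out : List (Int × Int)) : Decidable (Spec_find_unaligned_regions rg_min rg_max aligned_indices merge_threshold out) := by unfold Spec_find_unaligned_regions; infer_instance

-- ===== CLAIM (what is proved, stated in full; the proofs are below) =====
def Claim_equal_find_unaligned_regions : Prop := ∀ (rg_min : Int) (rg_max : Int) (aligned_indices : List Int) (merge_threshold : Int), Dom_find_unaligned_regions rg_min rg_max aligned_indices merge_threshold → Spec_find_unaligned_regions rg_min rg_max aligned_indices merge_threshold (find_unaligned_regions rg_min rg_max aligned_indices merge_threshold)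

-- ===== LEMMAS AND PROOFS =====

-- Combine step of the canonical recursion: prepend the unaligned index lo to the hole list.
def pvExt (lo : Int) : List (Int × Int) → List (Int × Int)
  | (s, e) :: t => if s = lo + 1 then (lo, e) :: t else (lo, lo) :: (s, e) :: t
  | [] => [(lo, lo)]

-- Canonical form of the hole list: recursion over the index range.
def pvHR (mem : Int → Bool) (lo hi : Int) : List (Int × Int) :=
  if h : hi < lo then []
  else if mem lo then pvHR mem (lo + 1) hi
  else pvExt lo (pvHR mem (lo + 1) hi)
termination_by (hi + 1 - lo).toNat
decreasing_by all_goals omega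

-- B's cursor walk over the anchor list, in recursive form.
def pvWalk (hi : Int) (c : Int) : List Int → List (Int × Int)
  | [] => if c ≤ hi then [(c, hi)] else []
  | a :: rest => (if c ≤ a - 1 then [(c, a - 1)] else []) ++ pvWalk hi (a + 1) rest

-- A's hole extraction over a plain value list.
def pvAH (mem : Int → Bool) (l : List Int) : List (Int × Int) :=
  ((pvGroupBy mem l).filter (fun g => !g.1)).map (fun g => (g.2.headD 0, g.2.getLastD 0))

theorem pvEnumAux_eq {α : Type} :
    ∀ (l : List α) (s : Int) (acc : List (Int × α)),
      pvEnumAux s l acc = acc.reverse ++ PySem.List.enumerate l s := by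
  intro l
  induction l with
  | nil => intro s acc; simp [pvEnumAux, PySem.List.enumerate_nil]
  | cons x xs IH =>
    intro s acc
    simp [pvEnumAux, IH, PySem.List.enumerate_cons]

theorem pvAH_nil (mem : Int → Bool) : pvAH mem [] = [] := by
  simp [pvAH, pvGroupBy]

theorem pvGroupBy_map {α β : Type} (key : β → Bool) (f : α → β) (l : List α) :
    pvGroupBy key (l.map f) = (pvGroupBy (fun a => key (f a)) l).map (fun g => (g.1, g.2.map f)) := by
  induction hn : l.length using Nat.strong_induction_on generalizing l with
  | _ n IH =>
  cases l with
  | nil => simp [pvGroupBy]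
  | cons x xs =>
    subst hn
    rw [List.map_cons, pvGroupBy, pvGroupBy]
    rw [List.takeWhile_map, List.dropWhile_map]
    simp only [Function.comp_def]
    rw [IH ((xs.dropWhile (fun y => key (f y) == key (f x))).length)
          (by simpa using Nat.lt_succ_of_le (List.length_dropWhile_le _ _)) _ rfl]
    simp

theorem pvGroupBy_sub {α : Type} (key : α → Bool) :
    ∀ (l : List α) (g : Bool × List α), g ∈ pvGroupBy key l → ∀ p ∈ g.2, p ∈ l := by
  intro l
  induction hn : l.length using Nat.strong_induction_on generalizing l with
  | _ n IH =>
  cases l with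
  | nil => intro g hg; simp [pvGroupBy] at hg
  | cons x xs =>
    subst hn
    intro g hg p hp
    rw [pvGroupBy] at hg
    rcases List.mem_cons.1 hg with h | h
    · subst h
      rcases List.mem_cons.1 hp with h | h
      · simp [h]
      · exact List.mem_cons_of_mem _ ((List.takeWhile_sublist _).subset h)
    · have := IH ((xs.dropWhile (fun y => key y == key x)).length)
        (by simpa using Nat.lt_succ_of_le (List.length_dropWhile_le _ _)) _ rfl g h p hp
      exact List.mem_cons_of_mem _ ((List.dropWhile_sublist _).subset this)

theorem pvAH_cons_mem (mem : Int → Bool) (x : Int) (xs : List Int) (hx : mem x = true) :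
    pvAH mem (x :: xs) = pvAH mem xs := by
  cases xs with
  | nil => simp [pvAH, pvGroupBy, hx]
  | cons y ys =>
    cases hy : mem y with
    | true => simp [pvAH, pvGroupBy, hx, hy]
    | false => simp [pvAH, pvGroupBy, hx, hy]

theorem pvAH_singleton (mem : Int → Bool) (x : Int) (hx : mem x = false) :
    pvAH mem [x] = [(x, x)] := by
  simp [pvAH, pvGroupBy, hx]

theorem pvAH_cons_ft (mem : Int → Bool) (x y : Int) (ys : List Int)
    (hx : mem x = false) (hy : mem y = true) :
    pvAH mem (x :: y :: ys) = (x, x) :: pvAH mem (y :: ys) := by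
  simp [pvAH, pvGroupBy, hx, hy]

theorem pvAH_cons_ff (mem : Int → Bool) (x y : Int) (ys : List Int)
    (hx : mem x = false) (hy : mem y = false) :
    pvAH mem (x :: y :: ys)
      = (x, ((pvAH mem (y :: ys)).headD (0, 0)).2) :: (pvAH mem (y :: ys)).tail := by
  simp [pvAH, pvGroupBy, hx, hy]

theorem pvHR_starts (mem : Int → Bool) (hi : Int) :
    ∀ (n : ℕ) (lo : Int), (hi + 1 - lo).toNat = n →
      ∀ p ∈ pvHR mem lo hi, mem p.1 = false := by
  intro n
  induction n using Nat.strong_induction_on with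
  | _ n IH =>
  intro lo hn p hp
  rw [pvHR] at hp
  by_cases h : hi < lo
  · simp [h] at hp
  · rw [dif_neg h] at hp
    by_cases hm : mem lo = true
    · rw [if_pos hm] at hp
      exact IH ((hi + 1 - (lo + 1)).toNat) (by omega) (lo + 1) rfl p hp
    · have hm' : mem lo = false := by simpa using hm
      rw [if_neg hm] at hp
      have IHrec : ∀ q ∈ pvHR mem (lo + 1) hi, mem q.1 = false :=
        IH ((hi + 1 - (lo + 1)).toNat) (by omega) (lo + 1) rfl
      rcases hE : pvHR mem (lo + 1) hi with _ | ⟨⟨s, e⟩, t⟩ <;> rw [hE] at hp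
      · simp [pvExt] at hp; simp [hp, hm']
      · by_cases hs : s = lo + 1
        · simp only [pvExt, if_pos hs] at hp
          rcases List.mem_cons.1 hp with h1 | h1
          · simp [h1, hm']
          · exact IHrec p (by rw [hE]; exact List.mem_cons_of_mem _ h1)
        · simp only [pvExt, if_neg hs] at hp
          rcases List.mem_cons.1 hp with h1 | h1
          · simp [h1, hm']
          · exact IHrec p (by rw [hE]; exact h1)

theorem pvHR_head (mem : Int → Bool) (lo hi : Int) (hlo : lo ≤ hi) (hm : mem lo = false) :
    ∃ e t, pvHR mem lo hi = (lo, e) :: t := by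
  rw [pvHR, dif_neg (by omega), if_neg (by simp [hm])]
  rcases pvHR mem (lo + 1) hi with _ | ⟨⟨s, e⟩, t⟩
  · exact ⟨lo, [], by simp [pvExt]⟩
  · by_cases hs : s = lo + 1
    · exact ⟨e, t, by simp [pvExt, hs]⟩
    · exact ⟨lo, (s, e) :: t, by simp [pvExt, hs]⟩

theorem pvAH_eq_pvHR (mem : Int → Bool) (hi : Int) :
    ∀ (n : ℕ) (lo : Int), (hi + 1 - lo).toNat = n →
      pvAH mem (PySem.List.pyRange lo (hi + 1) 1) = pvHR mem lo hi := by
  intro n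
  induction n using Nat.strong_induction_on with
  | _ n IH =>
  intro lo hn
  by_cases h : hi < lo
  · rw [PySem.List.pyRange_one_eq_nil (by omega), pvAH_nil, pvHR, dif_pos h]
  · have hIH : pvAH mem (PySem.List.pyRange (lo + 1) (hi + 1) 1) = pvHR mem (lo + 1) hi :=
      IH ((hi + 1 - (lo + 1)).toNat) (by omega) (lo + 1) rfl
    rw [pvHR, dif_neg h]
    by_cases hm : mem lo = true
    · rw [if_pos hm, PySem.List.pyRange_one_cons (by omega), pvAH_cons_mem mem lo _ hm]
      exact hIH
    · have hm' : mem lo = false := by simpa using hm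
      rw [if_neg hm]
      by_cases heq : hi < lo + 1
      · have hnil : PySem.List.pyRange (lo + 1) (hi + 1) 1 = [] :=
          PySem.List.pyRange_one_eq_nil (by omega)
        have hHR : pvHR mem (lo + 1) hi = [] := by rw [pvHR, dif_pos heq]
        rw [hHR, PySem.List.pyRange_one_cons (by omega), hnil, pvAH_singleton mem lo hm']
        simp [pvExt]
      · rw [PySem.List.pyRange_one_cons (by omega : lo < hi + 1),
            PySem.List.pyRange_one_cons (by omega : lo + 1 < hi + 1)]
        cases hy : mem (lo + 1) with
        | true =>
          rw [pvAH_cons_ft mem lo (lo + 1) _ hm' hy,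
              ← PySem.List.pyRange_one_cons (by omega : lo + 1 < hi + 1), hIH]
          rcases hE : pvHR mem (lo + 1) hi with _ | ⟨⟨s, e⟩, t⟩
          · simp [pvExt]
          · have hs : ¬ s = lo + 1 := by
              intro hc
              have := pvHR_starts mem hi ((hi + 1 - (lo + 1)).toNat) (lo + 1) rfl (s, e)
                (by rw [hE]; exact List.mem_cons_self ..)
              rw [hc] at this; simp [hy] at this
            simp [pvExt, hs]
        | false =>
          obtain ⟨e, t, hE⟩ := pvHR_head mem (lo + 1) hi (by omega) hy
          rw [pvAH_cons_ff mem lo (lo + 1) _ hm' hy,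
              ← PySem.List.pyRange_one_cons (by omega : lo + 1 < hi + 1), hIH, hE]
          simp [pvExt]

theorem pvWalk_start_ge (hi : Int) :
    ∀ (S : List Int) (c : Int), S.Pairwise (· < ·) → (∀ a ∈ S, c ≤ a) →
      ∀ p ∈ pvWalk hi c S, c ≤ p.1 := by
  intro S
  induction S with
  | nil =>
    intro c _ _ p hp
    simp only [pvWalk] at hp
    split at hp
    · simp at hp; simp [hp]
    · simp at hp
  | cons a rest IH =>
    intro c hpw hb p hp
    simp only [pvWalk, List.mem_append] at hp
    rcases hp with hp | hp
    · split at hp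
      · simp at hp; simp [hp]
      · simp at hp
    · have hca : c ≤ a := hb a (by simp)
      have := IH (a + 1) (List.Pairwise.sublist (List.sublist_cons_self _ _) hpw)
        (fun b hbmem => by have := (List.pairwise_cons.1 hpw).1 b hbmem; omega) p hp
      omega

theorem pvWalk_good (hi : Int) :
    ∀ (S : List Int) (c : Int), S.Pairwise (· < ·) → (∀ a ∈ S, c ≤ a) →
      (∀ p ∈ pvWalk hi c S, p.1 ≤ p.2) ∧
      (pvWalk hi c S).Pairwise (fun p q => p.2 + 2 ≤ q.1 ∧ p.1 < q.1) := by
  intro S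
  induction S with
  | nil =>
    intro c _ _
    constructor
    · intro p hp
      simp only [pvWalk] at hp
      split at hp
      · simp at hp; next h => simp [hp, h]
      · simp at hp
    · simp only [pvWalk]; split <;> simp
  | cons a rest IH =>
    intro c hpw hb
    have hca : c ≤ a := hb a (by simp)
    have htail : rest.Pairwise (· < ·) := List.Pairwise.sublist (List.sublist_cons_self _ _) hpw
    have hbtail : ∀ b ∈ rest, a + 1 ≤ b := fun b hbmem => by
      have := (List.pairwise_cons.1 hpw).1 b hbmem; omega
    obtain ⟨IH1, IH2⟩ := IH (a + 1) htail hbtail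
    have hstart : ∀ p ∈ pvWalk hi (a + 1) rest, a + 1 ≤ p.1 :=
      pvWalk_start_ge hi rest (a + 1) htail hbtail
    constructor
    · intro p hp
      simp only [pvWalk, List.mem_append] at hp
      rcases hp with hp | hp
      · split at hp
        · simp at hp; next h => simp [hp]; omega
        · simp at hp
      · exact IH1 p hp
    · simp only [pvWalk]
      rw [List.pairwise_append]
      refine ⟨?_, IH2, ?_⟩
      · split <;> simp
      · intro p hp q hq
        have hq1 := hstart q hq
        split at hp
        · simp at hp
          constructor <;> (simp [hp]; omega)
        · simp at hp

theorem pvWalk_eq_pvHR (mem : Int → Bool) (hi : Int) :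
    ∀ (n : ℕ) (c : Int) (S : List Int), (hi + 1 - c).toNat = n →
      S.Pairwise (· < ·) → (∀ a ∈ S, c ≤ a ∧ a ≤ hi) →
      (∀ i, c ≤ i → i ≤ hi → (mem i = true ↔ i ∈ S)) →
      pvWalk hi c S = pvHR mem c hi := by
  intro n
  induction n using Nat.strong_induction_on with
  | _ n IH =>
  intro c S hn hpw hbnd hiff
  by_cases h : hi < c
  · have hS : S = [] := by
      cases S with
      | nil => rfl
      | cons a rest => exact absurd (hbnd a (by simp)) (by omega)
    rw [hS, pvHR, dif_pos h]
    simp [pvWalk]; omega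
  · rw [pvHR, dif_neg h]
    cases hm : mem c with
    | true =>
      rw [if_pos rfl]
      have hcS : c ∈ S := (hiff c le_rfl (by omega)).1 hm
      cases S with
      | nil => simp at hcS
      | cons a rest =>
        have ha : a = c := by
          rcases List.mem_cons.1 hcS with h1 | h1
          · omega
          · have h2 := (hbnd a (by simp)).1
            have h3 := (List.pairwise_cons.1 hpw).1 c h1
            omega
        subst ha
        have hrest : pvWalk hi (a + 1) rest = pvHR mem (a + 1) hi := by
          apply IH ((hi + 1 - (a + 1)).toNat) (by omega) _ _ rfl
            (List.Pairwise.sublist (List.sublist_cons_self _ _) hpw)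
          · intro b hb
            have := (List.pairwise_cons.1 hpw).1 b hb
            exact ⟨by omega, (hbnd b (by simp [hb])).2⟩
          · intro i hci hih
            rw [hiff i (by omega) hih]
            constructor
            · intro hmem
              rcases List.mem_cons.1 hmem with h1 | h1
              · omega
              · exact h1
            · exact fun h1 => List.mem_cons_of_mem _ h1
        simp only [pvWalk]
        rw [if_neg (by omega), hrest]
        simp
    | false =>
      rw [if_neg (by simp)]
      have hcS : c ∉ S := fun hc => by simpa [hm] using (hiff c le_rfl (by omega)).2 hc
      have harg : ∀ a ∈ S, c + 1 ≤ a ∧ a ≤ hi := by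
        intro a ha
        have hle : c ≤ a ∧ a ≤ hi := hbnd a ha
        refine ⟨?_, hle.2⟩
        rcases eq_or_lt_of_le hle.1 with h1 | h1
        · exact absurd (h1 ▸ ha) hcS
        · omega
      have hrec : pvWalk hi (c + 1) S = pvHR mem (c + 1) hi :=
        IH ((hi + 1 - (c + 1)).toNat) (by omega) _ _ rfl hpw harg
          (fun i h1 h2 => hiff i (by omega) h2)
      rw [← hrec]
      cases S with
      | nil =>
        simp only [pvWalk]
        rw [if_pos (by omega : c ≤ hi)]
        by_cases h1 : c + 1 ≤ hi
        · rw [if_pos h1]; simp [pvExt]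
        · rw [if_neg h1]; simp [pvExt, show hi = c by omega]
      | cons a rest =>
        have ha1 : c + 1 ≤ a := (harg a (by simp)).1
        have htail : rest.Pairwise (· < ·) :=
          List.Pairwise.sublist (List.sublist_cons_self _ _) hpw
        have hstart : ∀ p ∈ pvWalk hi (a + 1) rest, a + 1 ≤ p.1 := by
          apply pvWalk_start_ge hi rest (a + 1) htail
          intro b hb
          have := (List.pairwise_cons.1 hpw).1 b hb
          omega
        simp only [pvWalk]
        rw [if_pos (by omega : c ≤ a - 1)]
        by_cases ha2 : a = c + 1
        · rw [if_neg (by omega)]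
          simp only [List.nil_append]
          rcases hE : pvWalk hi (a + 1) rest with _ | ⟨⟨s, e⟩, t⟩
          · simp [pvExt, ha2]
          · have hs : ¬ s = c + 1 := by
              have := hstart (s, e) (by rw [hE]; exact List.mem_cons_self ..)
              simp at this; omega
            simp [pvExt, ha2, hs]
        · rw [if_pos (by omega)]
          simp [pvExt]

theorem pvFold_walk (hi : Int) :
    ∀ (S : List Int) (acc : List (Int × Int)) (c : Int),
      (let st := S.foldl (fun st a =>
          ((if st.2 ≤ a - 1 then st.1 ++ [(st.2, a - 1)] else st.1), a + 1)) (acc, c);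
       if st.2 ≤ hi then st.1 ++ [(st.2, hi)] else st.1) = acc ++ pvWalk hi c S := by
  intro S
  induction S with
  | nil =>
    intro acc c
    simp only [List.foldl_nil, pvWalk]
    split <;> simp
  | cons a rest IH =>
    intro acc c
    simp only [List.foldl_cons, pvWalk]
    rw [IH]
    split <;> simp

theorem pvMerge_eq (th : Int) :
    ∀ (l : List (Int × Int)) (acc : List (Int × Int)),
      (∀ p ∈ l, p.1 ≤ p.2) → l.Pairwise (fun p q => p.2 + 2 ≤ q.1 ∧ p.1 < q.1) →
      (∀ q0, acc.getLast? = some q0 → ∀ p ∈ l, q0.2 < p.1) →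
      l.foldl (fun merged p =>
        match merged.getLast? with
        | some q => if p.1 - q.2 ≤ th then merged.dropLast ++ [(q.1, max q.2 p.2)]
                    else merged ++ [p]
        | none => merged ++ [p]) acc
      = l.foldl (fun merged p =>
        match merged.getLast? with
        | some q => if p.1 - q.2 ≤ th then merged.dropLast ++ [(q.1, p.2)]
                    else merged ++ [p]
        | none => [p]) acc := by
  intro l
  induction l with
  | nil => intro acc _ _ _; rfl
  | cons p l IH =>
    intro acc hb hpw hinv
    have hple : p.1 ≤ p.2 := hb p (by simp)
    have hnext : ∀ r ∈ l, p.2 + 2 ≤ r.1 := fun r hr =>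
      ((List.pairwise_cons.1 hpw).1 r hr).1
    simp only [List.foldl_cons]
    rcases hacc : acc.getLast? with _ | q
    · have haccnil : acc = [] := List.getLast?_eq_none_iff.1 hacc
      subst haccnil
      simp only [List.nil_append]
      apply IH _ (fun r hr => hb r (by simp [hr]))
        (List.Pairwise.sublist (List.sublist_cons_self _ _) hpw)
      intro q0 hq0 r hr
      rw [List.getLast?_singleton] at hq0
      injection hq0 with hinj
      subst hinj
      have := hnext r hr; omega
    · have hq : q.2 < p.1 := hinv q hacc p (by simp)
      have hmax : max q.2 p.2 = p.2 := by omega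
      simp only [hmax]
      split
      · apply IH _ (fun r hr => hb r (by simp [hr]))
          (List.Pairwise.sublist (List.sublist_cons_self _ _) hpw)
        intro q0 hq0 r hr
        rw [List.getLast?_concat] at hq0
        injection hq0 with hinj
        subst hinj
        have := hnext r hr
        simp only [] at *
        omega
      · apply IH _ (fun r hr => hb r (by simp [hr]))
          (List.Pairwise.sublist (List.sublist_cons_self _ _) hpw)
        intro q0 hq0 r hr
        rw [List.getLast?_concat] at hq0
        injection hq0 with hinj
        subst hinj
        have := hnext r hr
        omega

theorem pvA_bridge (mem : Int → Bool) (lo b : Int) :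
    (((pvGroupBy (fun x => mem x.2) (PySem.List.enumerate (PySem.List.pyRange lo b 1) 0)).filter
        (fun g => !g.1)).map (fun g => g.2.map (fun x => lo + x.1))).map
      (fun g => (g.headD 0, g.getLastD 0))
    = pvAH mem (PySem.List.pyRange lo b 1) := by
  have hsnd : (PySem.List.enumerate (PySem.List.pyRange lo b 1) 0).map (fun p => p.2)
      = PySem.List.pyRange lo b 1 := PySem.List.map_snd_enumerate _ _
  have hval : ∀ p ∈ PySem.List.enumerate (PySem.List.pyRange lo b 1) 0, lo + p.1 = p.2 := by
    intro p hp
    rw [PySem.List.mem_enumerate_iff] at hp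
    obtain ⟨k, hk, hpeq⟩ := hp
    subst hpeq
    rw [PySem.List.getElem_pyRange_one]
    simp
  unfold pvAH
  conv_rhs => rw [← hsnd, pvGroupBy_map]
  rw [List.filter_map, List.map_map, List.map_map]
  apply List.map_congr_left
  intro g hg
  have hgmem : g ∈ pvGroupBy (fun a => mem a.2)
      (PySem.List.enumerate (PySem.List.pyRange lo b 1) 0) :=
    List.mem_of_mem_filter hg
  have hmap : g.2.map (fun x => lo + x.1) = g.2.map (fun p => p.2) :=
    List.map_congr_left (fun p hp => hval p (pvGroupBy_sub _ _ g hgmem p hp))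
  simp [hmap]

-- ===== VERDICT (by name: the statement is the Claim_ definition above) =====
theorem find_unaligned_regions_spec : Claim_equal_find_unaligned_regions := by
  intro lo hi al th _
  unfold Spec_find_unaligned_regions find_unaligned_regions find_unaligned_regions_alt
  simp only []
  set mem : Int → Bool := fun v => al.contains v with hmemdef
  set anchors : List Int :=
    PySem.List.sorted
      (PySem.Set.ofList (al.filter (fun i => decide (lo ≤ i) && decide (i ≤ hi))))
      (fun x => x) false with hanch
  have hpw : anchors.Pairwise (· < ·) := PySem.List.sorted_ofList_pairwise_lt _
  have hmemanch : ∀ i, i ∈ anchors ↔ (i ∈ al ∧ lo ≤ i ∧ i ≤ hi) := by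
    intro i
    rw [hanch, PySem.List.mem_sorted, PySem.Set.mem_ofList, List.mem_filter]
    simp
  have hbnd : ∀ a ∈ anchors, lo ≤ a ∧ a ≤ hi := fun a ha => ((hmemanch a).1 ha).2
  have hiff : ∀ i, lo ≤ i → i ≤ hi → (mem i = true ↔ i ∈ anchors) := by
    intro i h1 h2
    rw [hmemanch i, hmemdef]
    simp [h1, h2]
  have hA : (((pvGroupBy (fun x => al.contains x.2)
        (pvEnumAux 0 (PySem.List.pyRange lo (hi + 1) 1) [])).filter
        (fun g => !g.1)).map (fun g => g.2.map (fun x => lo + x.1))).map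
        (fun g => (g.headD 0, g.getLastD 0)) = pvWalk hi lo anchors := by
    rw [pvEnumAux_eq, List.reverse_nil, List.nil_append, pvA_bridge mem lo (hi + 1), pvAH_eq_pvHR mem hi ((hi + 1 - lo).toNat) lo rfl,
        ← pvWalk_eq_pvHR mem hi ((hi + 1 - lo).toNat) lo anchors rfl hpw
          (fun a ha => hbnd a ha) hiff]
  have hB : (let st := anchors.foldl (fun st a =>
        ((if st.2 ≤ a - 1 then st.1 ++ [(st.2, a - 1)] else st.1), a + 1)) ([], lo);
      if st.2 ≤ hi then st.1 ++ [(st.2, hi)] else st.1) = pvWalk hi lo anchors := by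
    rw [pvFold_walk hi anchors [] lo]; simp
  rw [hA, hB]
  obtain ⟨hgood1, hgood2⟩ := pvWalk_good hi anchors lo hpw (fun a ha => (hbnd a ha).1)
  by_cases hth : th ≤ 0
  · rw [if_neg (by omega), if_pos hth]
  · rw [if_pos (by omega), if_neg hth]
    unfold merge_segments
    rcases hW : pvWalk hi lo anchors with _ | ⟨w, ws⟩
    · simp
    · rw [if_neg (by simp)]
      rw [← hW]
      have hsorted : PySem.List.sorted (pvWalk hi lo anchors) (fun p => p.1) false
          = pvWalk hi lo anchors :=
        PySem.List.sorted_eq_self_of_pairwise _ _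
          (hgood2.imp (fun h => le_of_lt h.2))
      rw [hsorted]
      exact pvMerge_eq th (pvWalk hi lo anchors) [] hgood1 hgood2
        (fun q0 hq0 => by simp at hq0)
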